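-- pv_equiv track=rewrite | github.com/tripathivinay82/MyPython | HR-The-Minon-Game.py | stuartString
-- ===== SOURCE A (Python) =====
-- def stuartString(string):
--     vowel=['A','E','I','O','U']
--     string=list(string)
--     s1=string.copy()
--
--     for a in range(len(string)):
--         if string[a] in vowel:
--             s1.remove(string[a])
--         else:
--             return listToStr(s1)
--
-- def listToStr(s):
--     s1=''
--     for i in range(len(s)):
--         s1=s1+s[i]
--
--     return s1
-- ===== SOURCE B (Python) =====
-- def stuartString(string):
--     t = string.lstrip('AEIOU')
--     return t if t else None
-- ===== Notes on version B (the rewrite author's own statement) =====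
-- stated objective: idiomatic
-- what changed: Replaces the copy-the-list-and-remove-each-leading-vowel loop (with a second index loop rebuilding the string) by a single str.lstrip call on the uppercase-vowel set plus a truthiness check.
import Mathlib
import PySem

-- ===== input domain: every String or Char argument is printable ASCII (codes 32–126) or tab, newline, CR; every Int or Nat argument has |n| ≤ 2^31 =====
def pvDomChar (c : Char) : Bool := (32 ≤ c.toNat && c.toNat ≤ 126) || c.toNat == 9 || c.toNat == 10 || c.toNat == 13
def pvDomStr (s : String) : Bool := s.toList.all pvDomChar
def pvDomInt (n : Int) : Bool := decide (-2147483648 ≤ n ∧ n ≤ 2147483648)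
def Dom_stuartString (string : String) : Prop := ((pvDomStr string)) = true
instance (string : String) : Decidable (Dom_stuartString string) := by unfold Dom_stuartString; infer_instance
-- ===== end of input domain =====

-- ===== PORT A =====
-- B replaces A's list-copy-and-remove loop by str.lstrip plus a truthiness check (idiomatic).
-- helper: A's listToStr (index loop concatenating one character at a time)
def pvListToStr (s : List Char) : String :=
  (List.range s.length).foldl (fun s1 i => s1 ++ String.ofList [s.getD i ' ']) ""

-- A's for-loop over indices; s1 is the mutated copy. remove? = list.remove (its
-- ValueError case is unreachable here: the removed char is always s1's head).
def stuartLoop (string : List Char) (s1 : List Char) (a : Nat) : Option String :=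
  if _h : a < string.length then
    let c := string.getD a ' '
    if ['A','E','I','O','U'].contains c then
      match PySem.List.remove? s1 c with
      | some s1' => stuartLoop string s1' (a+1)
      | none => none
    else some (pvListToStr s1)
  else none
termination_by string.length - a

def stuartString (string : String) : Option String :=
  stuartLoop string.toList string.toList 0

-- ===== PORT B =====
-- hand port of str.lstrip('AEIOU') (exact: drops the leading run of chars from the set),
-- then Python truthiness of the result
def stuartString_alt (string : String) : Option String :=
  let t := string.toList.dropWhile (fun c => ['A','E','I','O','U'].contains c)
  if t.isEmpty then none else some (String.ofList t)

-- ===== PRECONDITION & SPEC =====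
def Spec_stuartString (string : String) (out : Option String) : Prop := out = stuartString_alt string
instance (string : String) (out : Option String) : Decidable (Spec_stuartString string out) := by unfold Spec_stuartString; infer_instance

-- ===== CLAIM (what is proved, stated in full; the proofs are below) =====
def Claim_equal_stuartString : Prop := ∀ (string : String), Dom_stuartString string → Spec_stuartString string (stuartString string)

-- ===== LEMMAS AND PROOFS =====

theorem pvListToStr_aux (s : List Char) (n : Nat) (hn : n ≤ s.length) :
    (List.range n).foldl (fun s1 i => s1 ++ String.ofList [s.getD i ' ']) "" =
      String.ofList (s.take n) := by
  induction n with
  | zero => simp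
  | succ n ih =>
    have hn' : n < s.length := by omega
    have hg : s.getD n ' ' = s[n] := by simp [List.getD_eq_getElem?_getD, hn']
    rw [List.range_succ, List.foldl_append, ih (by omega)]
    rw [List.foldl_cons, List.foldl_nil, hg, ← String.ofList_append, List.take_add_one, List.getElem?_eq_getElem hn']
    rfl

theorem pvListToStr_eq (s : List Char) : pvListToStr s = String.ofList s := by
  simpa using pvListToStr_aux s s.length le_rfl

theorem stuartLoop_eq (s : List Char) (k a : Nat) (hk : s.length - a = k) :
    stuartLoop s (s.drop a) a =
      (let t := (s.drop a).dropWhile (fun c => ['A','E','I','O','U'].contains c);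
       if t.isEmpty then none else some (String.ofList t)) := by
  induction k generalizing a with
  | zero =>
    have h : s.length ≤ a := by omega
    rw [stuartLoop, dif_neg (by omega), List.drop_eq_nil_of_le h]
    rfl
  | succ k ih =>
    have h : a < s.length := by omega
    have hdrop : s.drop a = s[a] :: s.drop (a+1) := List.drop_eq_getElem_cons h
    have hgetD : s.getD a ' ' = s[a] := by simp [List.getD_eq_getElem?_getD, h]
    rw [stuartLoop, dif_pos h]
    simp only [hgetD]
    by_cases hv : (['A','E','I','O','U'].contains s[a]) = true
    · rw [if_pos hv, hdrop, PySem.List.remove?_cons_self, List.dropWhile_cons,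
        if_pos hv]
      exact ih (a+1) (by omega)
    · rw [if_neg hv, hdrop, List.dropWhile_cons, if_neg hv, pvListToStr_eq]
      rfl

-- ===== VERDICT (by name: the statement is the Claim_ definition above) =====
theorem stuartString_spec : Claim_equal_stuartString := by
  intro string _
  unfold Spec_stuartString stuartString stuartString_alt
  have h := stuartLoop_eq string.toList string.toList.length 0 rfl
  simpa using h
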